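-- pv_equiv track=rewrite | github.com/mohamedshaban463/Priority-vs-SRTF | src/scheduler/srtf.py | _merge_gantt
-- ===== SOURCE A (Python) =====
-- def _merge_gantt(segments):
--     """
--     Merge consecutive Gantt segments belonging to the same process.
--     Preemption points remain visible as boundaries between different PIDs.
--
--     Example:
--         [(0,1,"P1"), (1,3,"P1"), (3,5,"P2")] -> [(0,3,"P1"), (3,5,"P2")]
--     """
--     if not segments:
--         return []
--
--     merged = [list(segments[0])]
--     for start, end, pid in segments[1:]:
--         if merged[-1][2] == pid and merged[-1][1] == start:
--             merged[-1][1] = end   # extend the segment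
--         else:
--             merged.append([start, end, pid])
--
--     return [tuple(seg) for seg in merged]
-- ===== SOURCE B (Python) =====
-- def _merge_gantt(segments):
--     # Right-to-left fold: merge each segment into the front of the already-merged suffix.
--     merged = []
--     for start, end, pid in reversed(segments):
--         if merged and merged[0][2] == pid and merged[0][0] == end:
--             merged[0] = (start, merged[0][1], pid)
--         else:
--             merged = [(start, end, pid)] + merged
--     return merged
-- ===== Notes on version B (the rewrite author's own statement) =====
-- stated objective: alternative
-- what changed: A scans left-to-right keeping a list of merged segments and mutating its last element in place; B folds right-to-left, merging each segment into the front of the already-merged suffix, so the output is built back-to-front with no mutable last-element state.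
import Mathlib
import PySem

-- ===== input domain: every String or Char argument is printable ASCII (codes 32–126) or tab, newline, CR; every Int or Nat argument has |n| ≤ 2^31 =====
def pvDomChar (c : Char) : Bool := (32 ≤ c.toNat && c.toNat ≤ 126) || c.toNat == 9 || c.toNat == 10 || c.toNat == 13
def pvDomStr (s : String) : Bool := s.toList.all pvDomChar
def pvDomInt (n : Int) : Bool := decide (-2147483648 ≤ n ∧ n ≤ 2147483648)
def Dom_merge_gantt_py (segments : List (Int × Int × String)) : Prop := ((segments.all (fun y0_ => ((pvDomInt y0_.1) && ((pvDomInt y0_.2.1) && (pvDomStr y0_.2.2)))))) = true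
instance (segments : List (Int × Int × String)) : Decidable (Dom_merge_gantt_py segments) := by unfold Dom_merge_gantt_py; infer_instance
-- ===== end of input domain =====

-- B replaces A's left-to-right scan that mutates the last accumulated segment by a
-- right-to-left fold that merges each segment into the FRONT of the already-merged
-- suffix (objective: alternative decomposition; same asymptotic cost).

-- ===== PORT A =====
-- one loop step of A: look at merged[-1]; either extend it in place or append
def aStep (merged : List (Int × Int × String)) (seg : Int × Int × String) :
    List (Int × Int × String) :=
  match merged.getLast? with
  | some last =>
      if last.2.2 == seg.2.2 && last.2.1 == seg.1 then
        -- merged[-1][1] = end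
        merged.dropLast ++ [(last.1, seg.2.1, last.2.2)]
      else
        merged ++ [seg]
  | none => merged ++ [seg]   -- unreachable: merged starts nonempty and never shrinks

def merge_gantt_py (segments : List (Int × Int × String)) : List (Int × Int × String) :=
  match segments with
  | [] => []
  | s0 :: rest =>
      -- merged = [list(segments[0])]; for start, end, pid in segments[1:]: ...
      -- return [tuple(seg) for seg in merged]
      (rest.foldl aStep [s0]).map (fun seg => seg)

-- ===== PORT B =====
-- one step of B's reversed loop: merge seg into the front of the merged suffix
def bStep : (Int × Int × String) → List (Int × Int × String) → List (Int × Int × String)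
  | seg, [] => [seg]
  | (s, e, p), (s2, e2, p2) :: rest =>
      if p2 == p && s2 == e then (s, e2, p) :: rest
      else (s, e, p) :: (s2, e2, p2) :: rest

def merge_gantt_py_alt (segments : List (Int × Int × String)) : List (Int × Int × String) :=
  segments.foldr bStep []

-- ===== PRECONDITION & SPEC =====
def Spec_merge_gantt_py (segments : List (Int × Int × String)) (out : List (Int × Int × String)) : Prop := out = merge_gantt_py_alt segments
instance (segments : List (Int × Int × String)) (out : List (Int × Int × String)) : Decidable (Spec_merge_gantt_py segments out) := by unfold Spec_merge_gantt_py; infer_instance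

-- ===== CLAIM (what is proved, stated in full; the proofs are below) =====
def Claim_equal_merge_gantt_py : Prop := ∀ (segments : List (Int × Int × String)), Dom_merge_gantt_py segments → Spec_merge_gantt_py segments (merge_gantt_py segments)

-- ===== LEMMAS AND PROOFS =====

-- functional form of A's left scan: the scan only ever inspects/changes the last
-- accumulated element, so it is determined by that element and the remaining input
def gScan : (Int × Int × String) → List (Int × Int × String) → List (Int × Int × String)
  | l, [] => [l]
  | (a, b, q), (s, e, p) :: rest =>
      if q == p && b == s then gScan (a, e, q) rest
      else (a, b, q) :: gScan (s, e, p) rest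

theorem foldl_aStep : ∀ (rest init : List (Int × Int × String)) (a b : Int) (q : String),
    List.foldl aStep (init ++ [(a, b, q)]) rest = init ++ gScan (a, b, q) rest
  | [], init, a, b, q => by simp [gScan]
  | (s, e, p) :: rest, init, a, b, q => by
      by_cases h : (q == p && b == s) = true
      · have hs : aStep (init ++ [(a, b, q)]) (s, e, p) = init ++ [(a, e, q)] := by
          simp [aStep, List.dropLast_concat, h]
        rw [List.foldl_cons, hs, foldl_aStep rest init a e q]
        simp [gScan, h]
      · have hs : aStep (init ++ [(a, b, q)]) (s, e, p)
            = (init ++ [(a, b, q)]) ++ [(s, e, p)] := by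
          simp [aStep, h]
        rw [List.foldl_cons, hs, foldl_aStep rest (init ++ [(a, b, q)]) s e p]
        simp [gScan, h]

theorem bStep_merge (a b : Int) (q : String) (s e : Int) (p : String)
    (M : List (Int × Int × String)) (hq : q = p) (hb : b = s) :
    bStep (a, b, q) (bStep (s, e, p) M) = bStep (a, e, q) M := by
  subst hq; subst hb
  cases M with
  | nil => simp [bStep]
  | cons first t =>
      obtain ⟨s2, e2, p2⟩ := first
      simp only [bStep]
      split_ifs with h2 <;> simp [bStep]

theorem bStep_cons (a b : Int) (q : String) (s e : Int) (p : String)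
    (M : List (Int × Int × String)) (h : ¬(q == p && b == s) = true) :
    bStep (a, b, q) (bStep (s, e, p) M) = (a, b, q) :: bStep (s, e, p) M := by
  have hneg : ¬(p == q && s == b) = true := by
    simp only [Bool.and_eq_true, beq_iff_eq] at h ⊢
    exact fun ⟨h1, h2⟩ => h ⟨h1.symm, h2.symm⟩
  cases M with
  | nil => simp only [bStep]; rw [if_neg hneg]
  | cons first t =>
      obtain ⟨s2, e2, p2⟩ := first
      simp only [bStep]
      split_ifs with h2
      · simp only [bStep]; rw [if_neg hneg]
      · simp only [bStep]; rw [if_neg hneg]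

theorem gScan_bStep : ∀ (rest : List (Int × Int × String)) (a b : Int) (q : String),
    gScan (a, b, q) rest = bStep (a, b, q) (List.foldr bStep [] rest)
  | [], a, b, q => by simp [gScan, bStep]
  | (s, e, p) :: rest, a, b, q => by
      rw [List.foldr_cons]
      simp only [gScan]
      by_cases h : (q == p && b == s) = true
      · obtain ⟨hq, hb⟩ : q = p ∧ b = s := by simpa using h
        rw [if_pos h, gScan_bStep rest a e q,
          bStep_merge a b q s e p (List.foldr bStep [] rest) hq hb]
      · rw [if_neg h, gScan_bStep rest s e p,
          bStep_cons a b q s e p (List.foldr bStep [] rest) h]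

theorem foldl_aStep' (rest : List (Int × Int × String)) (a b : Int) (q : String) :
    List.foldl aStep [(a, b, q)] rest = gScan (a, b, q) rest := by
  simpa using foldl_aStep rest [] a b q

-- ===== VERDICT (by name: the statement is the Claim_ definition above) =====
theorem merge_gantt_py_spec : Claim_equal_merge_gantt_py := by
  intro segments _
  unfold Spec_merge_gantt_py
  cases segments with
  | nil => rfl
  | cons s0 rest =>
      obtain ⟨a, b, q⟩ := s0
      show (List.foldl aStep [(a, b, q)] rest).map (fun seg => seg) = _
      rw [foldl_aStep' rest a b q, gScan_bStep rest a b q]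
      simp [merge_gantt_py_alt]
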